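-- pv_equiv track=rewrite | github.com/arman1919/Exam | name_list.py | vowels_word
-- ===== SOURCE A (Python) =====
-- def vowels_word(name:str):
--     vowels = ['a', 'e', 'i', 'o', 'u']
--     lett = []
--     for i in name:
--         if i.lower() == "u":
--             lett.append("u")
--             break
--         if i.lower() in vowels:
--             lett.append(i.lower())
--
--     return lett
-- ===== SOURCE B (Python) =====
-- def vowels_word(name: str):
--     low = [c.lower() for c in name]
--     j = next((k for k, c in enumerate(low) if c == 'u'), None)
--     seg = low if j is None else low[:j + 1]
--     return [c for c in seg if c in ('a', 'e', 'i', 'o', 'u')]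
-- ===== Notes on version B (the rewrite author's own statement) =====
-- stated objective: alternative
-- what changed: B replaces A's single fused loop with early break by two separate passes: first locate the first 'u' in the per-character lowercased list to fix the segment boundary, then filter that segment for vowels.
import Mathlib
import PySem

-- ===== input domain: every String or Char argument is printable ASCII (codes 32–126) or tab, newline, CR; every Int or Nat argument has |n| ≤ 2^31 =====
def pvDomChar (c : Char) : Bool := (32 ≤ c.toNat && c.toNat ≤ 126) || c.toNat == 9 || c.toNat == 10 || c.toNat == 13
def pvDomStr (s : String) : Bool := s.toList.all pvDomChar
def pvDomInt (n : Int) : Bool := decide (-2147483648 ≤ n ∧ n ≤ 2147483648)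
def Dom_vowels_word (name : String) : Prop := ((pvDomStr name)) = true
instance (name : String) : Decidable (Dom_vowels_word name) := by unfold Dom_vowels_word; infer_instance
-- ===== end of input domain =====

-- B computes the first-'u' boundary in a separate pass, then filters the segment for vowels (alternative decomposition; same return value).
-- ===== PORT A =====
-- loop over the characters: lowercase, stop after first 'u', collect vowels
def vowels_word_loop : List Char → List String
  | [] => []
  | c :: rest =>
    let l := PySem.Chars.lowerChar c
    if l = 'u' then ["u"]
    else if l ∈ ['a', 'e', 'i', 'o', 'u'] then String.ofList [l] :: vowels_word_loop rest
    else vowels_word_loop rest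

def vowels_word (name : String) : List String := vowels_word_loop name.toList

-- ===== PORT B =====
def vowels_word_alt (name : String) : List String :=
  let low := name.toList.map PySem.Chars.lowerChar
  let seg := match low.findIdx? (· = 'u') with
    | none => low
    | some j => low.take (j + 1)
  (seg.filter (· ∈ ['a', 'e', 'i', 'o', 'u'])).map (fun c => String.ofList [c])

-- ===== PRECONDITION & SPEC =====
def Spec_vowels_word (name : String) (out : List String) : Prop := out = vowels_word_alt name
instance (name : String) (out : List String) : Decidable (Spec_vowels_word name out) := by unfold Spec_vowels_word; infer_instance

-- ===== CLAIM (what is proved, stated in full; the proofs are below) =====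
def Claim_equal_vowels_word : Prop := ∀ (name : String), Dom_vowels_word name → Spec_vowels_word name (vowels_word name)

-- ===== LEMMAS AND PROOFS =====

-- ===== VERDICT (by name: the statement is the Claim_ definition above) =====
-- core lemma: the fused loop equals the find-then-filter decomposition on any char list
theorem vowels_word_loop_eq (l : List Char) :
    vowels_word_loop l =
      ((match (l.map PySem.Chars.lowerChar).findIdx? (· = 'u') with
        | none => l.map PySem.Chars.lowerChar
        | some j => (l.map PySem.Chars.lowerChar).take (j + 1)).filter
          (· ∈ ['a', 'e', 'i', 'o', 'u'])).map (fun c => String.ofList [c]) := by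
  induction l with
  | nil => simp [vowels_word_loop]
  | cons c rest ih =>
    simp only [vowels_word_loop, List.map_cons, List.findIdx?_cons]
    by_cases hu : PySem.Chars.lowerChar c = 'u'
    · simp [hu]
    · simp only [hu, decide_false, Bool.false_eq_true, if_false]
      cases hfi : (rest.map PySem.Chars.lowerChar).findIdx? (· = 'u') with
      | none =>
        rw [hfi] at ih
        by_cases hv : PySem.Chars.lowerChar c ∈ ['a', 'e', 'i', 'o', 'u'] <;>
          simp_all
      | some j =>
        rw [hfi] at ih
        by_cases hv : PySem.Chars.lowerChar c ∈ ['a', 'e', 'i', 'o', 'u'] <;>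
          simp_all [List.take_succ_cons]

theorem vowels_word_spec : Claim_equal_vowels_word := by
  intro name _
  unfold Spec_vowels_word vowels_word vowels_word_alt
  exact vowels_word_loop_eq name.toList
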